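-- pv_equiv track=rewrite | github.com/shart123456/rustynets | benchmark.py | generate_test_urls
-- ===== SOURCE A (Python) =====
-- from typing import List, Dict, Any, Tuple
--
-- def generate_test_urls(count: int) -> List[str]:
--     """Generate test URLs."""
--     base_urls = [
--         "https://google.com", "https://github.com", "https://stackoverflow.com",
--         "https://python.org", "https://rust-lang.org", "https://wikipedia.org",
--         "https://example.com", "https://httpbin.org/get", "https://api.github.com"
--     ]
--
--     urls = []
--     for i in range(count):
--         urls.append(base_urls[i % len(base_urls)])
--
--     return urls
-- ===== SOURCE B (Python) =====
-- def generate_test_urls(count: int):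
--     """Generate test URLs."""
--     base_urls = [
--         "https://google.com", "https://github.com", "https://stackoverflow.com",
--         "https://python.org", "https://rust-lang.org", "https://wikipedia.org",
--         "https://example.com", "https://httpbin.org/get", "https://api.github.com"
--     ]
--     reps = count // len(base_urls) + 1
--     return (base_urls * reps)[:max(count, 0)]
-- ===== Notes on version B (the rewrite author's own statement) =====
-- stated objective: simpler
-- what changed: Replaces the per-index modulo loop with bulk list replication (base_urls * reps) truncated by a slice to max(count, 0).
import Mathlib
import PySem

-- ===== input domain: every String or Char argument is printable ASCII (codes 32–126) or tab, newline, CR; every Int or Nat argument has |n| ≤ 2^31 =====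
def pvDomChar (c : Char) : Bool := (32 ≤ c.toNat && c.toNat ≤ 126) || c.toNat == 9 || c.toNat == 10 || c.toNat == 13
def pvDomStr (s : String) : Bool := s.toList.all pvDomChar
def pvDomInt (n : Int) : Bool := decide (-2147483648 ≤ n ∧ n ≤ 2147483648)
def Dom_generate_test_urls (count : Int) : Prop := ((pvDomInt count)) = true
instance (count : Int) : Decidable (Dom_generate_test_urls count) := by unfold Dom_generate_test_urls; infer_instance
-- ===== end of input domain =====

-- B replaces A's per-index modulo loop with bulk replication of the base list truncated by a slice (simpler construction; same cost).

-- ===== PORT A =====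
def pvBaseA : List String :=
  ["https://google.com", "https://github.com", "https://stackoverflow.com",
   "https://python.org", "https://rust-lang.org", "https://wikipedia.org",
   "https://example.com", "https://httpbin.org/get", "https://api.github.com"]

-- urls = []; for i in range(count): urls.append(base_urls[i % len(base_urls)])
-- (pyGetD is exact here: i % 9 is always in range, so Python never raises)
def generate_test_urls (count : Int) : List String :=
  (PySem.List.pyRange 0 count 1).foldl
    (fun urls i => urls ++ [PySem.List.pyGetD pvBaseA (PySem.Int.mod i (PySem.List.len pvBaseA)) ""]) []

-- ===== PORT B =====
def pvBaseB : List String :=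
  ["https://google.com", "https://github.com", "https://stackoverflow.com",
   "https://python.org", "https://rust-lang.org", "https://wikipedia.org",
   "https://example.com", "https://httpbin.org/get", "https://api.github.com"]

-- reps = count // len(base_urls) + 1; return (base_urls * reps)[:max(count, 0)]
def generate_test_urls_alt (count : Int) : List String :=
  PySem.List.slice
    (List.flatten (List.replicate (PySem.Int.floordiv count (PySem.List.len pvBaseB) + 1).toNat pvBaseB))
    none (some (max count 0))

-- ===== PRECONDITION & SPEC =====
def Spec_generate_test_urls (count : Int) (out : List String) : Prop := out = generate_test_urls_alt count
instance (count : Int) (out : List String) : Decidable (Spec_generate_test_urls count out) := by unfold Spec_generate_test_urls; infer_instance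

-- ===== CLAIM (what is proved, stated in full; the proofs are below) =====
def Claim_equal_generate_test_urls : Prop := ∀ (count : Int), Dom_generate_test_urls count → Spec_generate_test_urls count (generate_test_urls count)

-- ===== LEMMAS AND PROOFS =====

-- the k-th element of r copies of the base list is base[k % 9]
theorem pv_getElem?_flatten_replicate (r n : Nat) (h : n < 9 * r) :
    (List.flatten (List.replicate r pvBaseB))[n]? = some (pvBaseB.getD (n % 9) "") := by
  induction r generalizing n with
  | zero => omega
  | succ r ih =>
    rw [List.replicate_succ, List.flatten_cons]
    by_cases hn : n < 9
    · rw [List.getElem?_append_left (by simp [pvBaseB]; omega)]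
      interval_cases n <;> rfl
    · rw [List.getElem?_append_right (by simp [pvBaseB]; omega)]
      have hlen : pvBaseB.length = 9 := by rfl
      have hm : (n - 9) % 9 = n % 9 := by omega
      rw [hlen, ih (n - 9) (by omega), hm]

-- taking n elements of enough copies of the base list yields the modulo map
theorem pv_take_flatten (n r : Nat) (h : n ≤ 9 * r) :
    List.take n (List.flatten (List.replicate r pvBaseB)) =
      (List.range n).map (fun k => pvBaseB.getD (k % 9) "") := by
  induction n with
  | zero => simp
  | succ n ih =>
    rw [List.take_add_one, ih (by omega), pv_getElem?_flatten_replicate r n (by omega),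
      List.range_succ, List.map_append]
    rfl

-- A's loop on a nonnegative count produces the modulo map
theorem pv_A_eq (n : Nat) :
    generate_test_urls (n : Int) = (List.range n).map (fun k => pvBaseA.getD (k % 9) "") := by
  induction n with
  | zero => simp [generate_test_urls, PySem.List.pyRange_one_eq_nil]
  | succ n ih =>
    unfold generate_test_urls at ih ⊢
    have hcast : ((n + 1 : Nat) : Int) = (n : Int) + 1 := by push_cast; ring
    rw [hcast, PySem.List.pyRange_one_succ_right (by positivity), List.foldl_append, ih,
      List.range_succ, List.map_append, List.foldl_cons, List.foldl_nil]
    have hmod : PySem.Int.mod (n : Int) (PySem.List.len pvBaseA) = ((n % 9 : Nat) : Int) := by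
      have h9 : PySem.List.len pvBaseA = ((9 : Nat) : Int) := by rfl
      rw [h9, PySem.Int.mod_natCast]
    rw [hmod, PySem.List.pyGetD_natCast]
    rfl

-- B on a nonnegative count produces the same modulo map
theorem pv_B_eq (n : Nat) :
    generate_test_urls_alt (n : Int) = (List.range n).map (fun k => pvBaseB.getD (k % 9) "") := by
  unfold generate_test_urls_alt
  have hlen : PySem.List.len pvBaseB = ((9 : Nat) : Int) := by rfl
  rw [hlen, PySem.Int.floordiv_natCast]
  have h1 : (((n / 9 : Nat) : Int) + 1).toNat = n / 9 + 1 := by omega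
  have h2 : max (n : Int) 0 = ((n : Nat) : Int) := by omega
  rw [h1, h2, PySem.List.slice_to_natCast]
  exact pv_take_flatten n (n / 9 + 1) (by omega)

-- ===== VERDICT (by name: the statement is the Claim_ definition above) =====
theorem generate_test_urls_spec : Claim_equal_generate_test_urls := by
  intro count _
  unfold Spec_generate_test_urls
  by_cases h : 0 ≤ count
  · obtain ⟨n, rfl⟩ := Int.eq_ofNat_of_zero_le h
    rw [pv_A_eq, pv_B_eq]
    rfl
  · rw [generate_test_urls, generate_test_urls_alt,
      PySem.List.pyRange_one_eq_nil (by omega)]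

    have hmax : max count 0 = ((0 : Nat) : Int) := by omega
    rw [hmax, PySem.List.slice_to_natCast]
    rfl
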